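-- pv_equiv track=rewrite | github.com/ravn/rc700-sysgen | rcbios-in-c/verify_checksums.py | compute_track_cksum
-- ===== SOURCE A (Python) =====
-- def find_sector(sectors, cyl, head, sec_id):
--     for c, h, s, d in sectors:
--         if c == cyl and h == head and s == sec_id:
--             return d
--     return None
--
-- def compute_track_cksum(sectors, trk, cpmspt, secshf, eotv, trantb):
--     """Compute track checksum using same logic as BIOS test."""
--     cksum = 0
--     errors = 0
--     for cpm_sec in range(cpmspt):
--         # Compute host sector: seksec >> (secshf-1)
--         hstsec = cpm_sec >> (secshf - 1)
--         # Determine side and physical sector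
--         if hstsec < eotv:
--             side = 0
--             phys_sec = trantb[hstsec]
--         else:
--             side = 1
--             phys_sec = trantb[hstsec - eotv]
--         # Record offset within host sector
--         secmsk = (1 << (secshf - 1)) - 1
--         rec_offset = (cpm_sec & secmsk) * 128
--         data = find_sector(sectors, trk, side, phys_sec)
--         if data is None:
--             errors += 1
--             continue
--         chunk = data[rec_offset:rec_offset+128]
--         cksum = (cksum + sum(chunk)) & 0xFFFF
--     return cksum, errors
-- ===== SOURCE B (Python) =====
-- def compute_track_cksum(sectors, trk, cpmspt, secshf, eotv, trantb):
--     """Compute track checksum by host sector: index the sectors once, then one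
--     lookup per host sector with an inner loop over its records."""
--     cksum = 0
--     errors = 0
--     if cpmspt > 0:
--         index = {}
--         for c, h, s, d in sectors:
--             index.setdefault((c, h, s), d)
--         rph = 1 << (secshf - 1)          # records per host sector
--         n_host = -(-cpmspt // rph)       # ceil(cpmspt / rph)
--         for hs in range(n_host):
--             side, idx = (0, hs) if hs < eotv else (1, hs - eotv)
--             phys_sec = trantb[idx]
--             nrec = min(rph, cpmspt - hs * rph)
--             data = index.get((trk, side, phys_sec))
--             if data is None:
--                 errors += nrec
--             else:
--                 for r in range(nrec):
--                     off = r * 128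
--                     cksum = (cksum + sum(data[off:off+128])) & 0xFFFF
--     return cksum, errors
-- ===== Notes on version B (the rewrite author's own statement) =====
-- stated objective: faster
-- what changed: B builds a dict index of the sectors once and loops over host sectors (one lookup per host sector, an inner loop over that host sector's records, a missing host sector adding its whole record count to errors) instead of A's flat per-record loop that rescans the sectors list with find_sector for every record.
import Mathlib
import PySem

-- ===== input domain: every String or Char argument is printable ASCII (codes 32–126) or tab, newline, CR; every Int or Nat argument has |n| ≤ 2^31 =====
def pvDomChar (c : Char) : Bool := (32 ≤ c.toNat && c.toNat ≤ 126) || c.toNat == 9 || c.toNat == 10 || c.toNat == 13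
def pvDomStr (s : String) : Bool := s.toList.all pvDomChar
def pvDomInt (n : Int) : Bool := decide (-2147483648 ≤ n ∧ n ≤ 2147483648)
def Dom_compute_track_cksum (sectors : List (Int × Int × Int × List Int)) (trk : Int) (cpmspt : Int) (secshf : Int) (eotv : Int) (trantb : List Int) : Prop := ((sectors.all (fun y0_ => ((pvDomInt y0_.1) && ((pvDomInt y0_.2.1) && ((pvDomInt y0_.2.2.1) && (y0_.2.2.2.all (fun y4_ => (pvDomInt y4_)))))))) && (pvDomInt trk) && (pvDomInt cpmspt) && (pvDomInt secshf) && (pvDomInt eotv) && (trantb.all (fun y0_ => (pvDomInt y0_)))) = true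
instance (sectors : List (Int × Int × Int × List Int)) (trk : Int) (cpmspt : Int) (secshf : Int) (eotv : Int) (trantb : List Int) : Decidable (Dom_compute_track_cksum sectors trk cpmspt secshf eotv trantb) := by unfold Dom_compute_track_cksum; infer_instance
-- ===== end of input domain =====

-- B replaces A's per-record loop (linear find_sector scan per record) by a dict index of the
-- sectors built once plus a loop over host sectors with an inner loop over each one's records.

-- ===== PORT A =====
def find_sector (sectors : List (Int × Int × Int × List Int)) (cyl : Int) (head : Int) (sec_id : Int) : Option (List Int) :=
  match sectors with
  | [] => none
  | (c, h, s, d) :: rest =>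
    if c = cyl ∧ h = head ∧ s = sec_id then some d
    else find_sector rest cyl head sec_id

-- A's loop body; outside Pre_ (secshf ≤ 0 with cpmspt > 0, or an out-of-range trantb index)
-- the Python raises, and the `.toNat` / `.getD 0` totalisations are unspecified stand-ins there.
def ctcA_body (sectors : List (Int × Int × Int × List Int)) (trk : Int) (secshf : Int) (eotv : Int) (trantb : List Int) (st : Int × Int) (cpm_sec : Int) : Int × Int :=
  let hstsec : Int := cpm_sec >>> (secshf - 1).toNat
  let sp : Int × Int :=
    if hstsec < eotv then (0, (PySem.List.pyGet? trantb hstsec).getD 0)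
    else (1, (PySem.List.pyGet? trantb (hstsec - eotv)).getD 0)
  let secmsk : Int := ((1 : Int) <<< (secshf - 1).toNat) - 1
  let rec_offset : Int := (PySem.Int.band cpm_sec secmsk) * 128
  match find_sector sectors trk sp.1 sp.2 with
  | none => (st.1, st.2 + 1)
  | some data =>
    (PySem.Int.band (st.1 + (PySem.List.slice data (some rec_offset) (some (rec_offset + 128))).sum) 0xFFFF, st.2)

def compute_track_cksum (sectors : List (Int × Int × Int × List Int)) (trk : Int) (cpmspt : Int) (secshf : Int) (eotv : Int) (trantb : List Int) : Int × Int :=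
  (PySem.List.pyRange 0 cpmspt 1).foldl (ctcA_body sectors trk secshf eotv trantb) (0, 0)

-- ===== PORT B =====
-- the dict index built once: index.setdefault((c, h, s), d) over the sectors
def ctc_index (sectors : List (Int × Int × Int × List Int)) : PySem.Dict (Int × Int × Int) (List Int) :=
  sectors.foldl (fun idx t => idx.setdefault (t.1, t.2.1, t.2.2.1) t.2.2.2) PySem.Dict.empty

-- body of B's loop over host sectors (one lookup, then the records of that host sector)
def ctcB_host (index : PySem.Dict (Int × Int × Int) (List Int)) (trk : Int) (cpmspt : Int) (rph : Int) (eotv : Int) (trantb : List Int) (st : Int × Int) (hs : Int) : Int × Int :=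
  let sp : Int × Int := if hs < eotv then (0, hs) else (1, hs - eotv)
  let phys_sec : Int := (PySem.List.pyGet? trantb sp.2).getD 0
  let nrec : Int := min rph (cpmspt - hs * rph)
  match index.get? (trk, sp.1, phys_sec) with
  | none => (st.1, st.2 + nrec)
  | some data =>
    ((PySem.List.pyRange 0 nrec 1).foldl
       (fun ck r => PySem.Int.band (ck + (PySem.List.slice data (some (r * 128)) (some (r * 128 + 128))).sum) 0xFFFF)
       st.1,
     st.2)

def compute_track_cksum_alt (sectors : List (Int × Int × Int × List Int)) (trk : Int) (cpmspt : Int) (secshf : Int) (eotv : Int) (trantb : List Int) : Int × Int :=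
  if 0 < cpmspt then
    let index := ctc_index sectors
    let rph : Int := (1 : Int) <<< (secshf - 1).toNat
    let n_host : Int := -(PySem.Int.floordiv (-cpmspt) rph)
    (PySem.List.pyRange 0 n_host 1).foldl (ctcB_host index trk cpmspt rph eotv trantb) (0, 0)
  else (0, 0)

-- ===== PRECONDITION & SPEC =====
-- the largest host-sector number the loop reaches (cpm_sec = cpmspt-1 shifted right)
def ctc_maxhst (cpmspt : Int) (secshf : Int) : Int := (cpmspt - 1) >>> (secshf - 1).toNat

-- Pre_ excludes exactly the inputs where the Python A raises: cpmspt > 0 with secshf ≤ 0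
-- (ValueError on the negative shift) or a trantb index out of range (IndexError).
def Pre_compute_track_cksum (sectors : List (Int × Int × Int × List Int)) (trk : Int) (cpmspt : Int) (secshf : Int) (eotv : Int) (trantb : List Int) : Prop :=
  cpmspt ≤ 0 ∨
    (1 ≤ secshf ∧
      (0 < eotv → min (ctc_maxhst cpmspt secshf) (eotv - 1) < (trantb.length : Int)) ∧
      (eotv ≤ ctc_maxhst cpmspt secshf → ctc_maxhst cpmspt secshf - eotv < (trantb.length : Int)))
instance (sectors : List (Int × Int × Int × List Int)) (trk : Int) (cpmspt : Int) (secshf : Int) (eotv : Int) (trantb : List Int) : Decidable (Pre_compute_track_cksum sectors trk cpmspt secshf eotv trantb) := by unfold Pre_compute_track_cksum; infer_instance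

def pvWitness_compute_track_cksum : (List (Int × Int × Int × List Int)) × Int × Int × Int × Int × List Int :=
  ([(0, 0, 1, [1, 2])], 0, 2, 1, 1, [1])

def Spec_compute_track_cksum (sectors : List (Int × Int × Int × List Int)) (trk : Int) (cpmspt : Int) (secshf : Int) (eotv : Int) (trantb : List Int) (out : Int × Int) : Prop := out = compute_track_cksum_alt sectors trk cpmspt secshf eotv trantb
instance (sectors : List (Int × Int × Int × List Int)) (trk : Int) (cpmspt : Int) (secshf : Int) (eotv : Int) (trantb : List Int) (out : Int × Int) : Decidable (Spec_compute_track_cksum sectors trk cpmspt secshf eotv trantb out) := by unfold Spec_compute_track_cksum; infer_instance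

-- ===== CLAIM (what is proved, stated in full; the proofs are below) =====
def Claim_equal_compute_track_cksum : Prop := ∀ (sectors : List (Int × Int × Int × List Int)) (trk : Int) (cpmspt : Int) (secshf : Int) (eotv : Int) (trantb : List Int), Dom_compute_track_cksum sectors trk cpmspt secshf eotv trantb → Pre_compute_track_cksum sectors trk cpmspt secshf eotv trantb → Spec_compute_track_cksum sectors trk cpmspt secshf eotv trantb (compute_track_cksum sectors trk cpmspt secshf eotv trantb)

-- ===== LEMMAS AND PROOFS =====

lemma ctc_one_shl (k : Nat) : (1 : Int) <<< k = 2 ^ k := by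
  rw [Int.shiftLeft_eq]; ring

lemma ctc_shr_block (hs j : Int) (k : Nat) (h0 : 0 ≤ hs) (hj0 : 0 ≤ j) (hjR : j < 2 ^ k) :
    (hs * 2 ^ k + j) >>> k = hs := by
  rw [Int.shiftRight_eq_div_pow]
  push_cast
  rw [show hs * 2 ^ k + j = j + 2 ^ k * hs by ring]
  rw [Int.add_mul_ediv_left j hs (by positivity)]
  rw [Int.ediv_eq_zero_of_lt hj0 hjR]
  ring

lemma ctc_band_block (hs j : Int) (k : Nat) (h0 : 0 ≤ hs) (hj0 : 0 ≤ j) (hjR : j < 2 ^ k) :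
    PySem.Int.band (hs * 2 ^ k + j) (2 ^ k - 1) = j := by
  have h2k : (0 : Int) < 2 ^ k := by positivity
  rw [PySem.Int.band_of_nonneg (by positivity) (by omega)]
  have h1 : ((hs.toNat * 2 ^ k + j.toNat : Nat) : Int) = hs * 2 ^ k + j := by
    simp only [Int.natCast_add, Int.natCast_mul, Int.natCast_pow, Int.toNat_of_nonneg h0,
      Int.toNat_of_nonneg hj0]
    push_cast
    ring
  have h2 : ((2 : Int) ^ k - 1).toNat = 2 ^ k - 1 := by
    have hc : ((2 ^ k : Nat) : Int) = (2 : Int) ^ k := by push_cast; ring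
    omega
  have hjlt : j.toNat < 2 ^ k := by
    have hc : ((2 ^ k : Nat) : Int) = (2 : Int) ^ k := by push_cast; ring
    omega
  rw [← h1, Int.toNat_natCast, h2, Nat.and_two_pow_sub_one_eq_mod, Nat.mul_comm,
    Nat.mul_add_mod, Nat.mod_eq_of_lt hjlt]
  exact Int.toNat_of_nonneg hj0

-- the dict index looks up exactly what find_sector finds (setdefault keeps first occurrences)
lemma ctc_index_aux (ss : List (Int × Int × Int × List Int)) (d : PySem.Dict (Int × Int × Int) (List Int)) (cyl head sec_id : Int) :
    (ss.foldl (fun idx t => idx.setdefault (t.1, t.2.1, t.2.2.1) t.2.2.2) d).get? (cyl, head, sec_id)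
      = (d.get? (cyl, head, sec_id)).or (find_sector ss cyl head sec_id) := by
  induction ss generalizing d with
  | nil => simp [find_sector]
  | cons t rest ih =>
    obtain ⟨c, h, s, dat⟩ := t
    simp only [List.foldl_cons, find_sector]
    rw [ih]
    by_cases heq : c = cyl ∧ h = head ∧ s = sec_id
    · obtain ⟨h1, h2, h3⟩ := heq
      subst h1; subst h2; subst h3
      rw [if_pos ⟨rfl, rfl, rfl⟩]
      rw [PySem.Dict.get?_setdefault_self]
      cases d.get? (c, h, s) <;> simp [Option.or]
    · rw [if_neg heq, PySem.Dict.get?_setdefault_of_ne]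
      intro hk
      apply heq
      simp only [Prod.mk.injEq] at hk
      exact ⟨hk.1.symm, hk.2.1.symm, hk.2.2.symm⟩

lemma ctc_index_get? (ss : List (Int × Int × Int × List Int)) (cyl head sec_id : Int) :
    (ctc_index ss).get? (cyl, head, sec_id) = find_sector ss cyl head sec_id := by
  unfold ctc_index
  rw [ctc_index_aux]
  simp [PySem.Dict.get?_empty]

lemma ctc_foldl_snd_add_one {β : Type} (l : List β) (st : Int × Int) :
    l.foldl (fun s (_ : β) => (s.1, s.2 + 1)) st = (st.1, st.2 + l.length) := by
  induction l generalizing st with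
  | nil => simp
  | cons x t ih => simp [ih]; omega

lemma ctc_foldl_fst {β : Type} (f : Int → β → Int) (l : List β) (st : Int × Int) :
    l.foldl (fun s x => (f s.1 x, s.2)) st = (l.foldl f st.1, st.2) := by
  induction l generalizing st with
  | nil => simp
  | cons x t ih => simp [ih]

-- the per-record behaviour of one host sector, for a fixed lookup result
lemma ctc_block_aux (sectors : List (Int × Int × Int × List Int)) (trk side phys nrec : Int)
    (hn : 0 ≤ nrec) (st : Int × Int) :
    (List.range nrec.toNat).foldl
        (fun st' (j : Nat) =>
          match find_sector sectors trk side phys with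
          | none => (st'.1, st'.2 + 1)
          | some data =>
            (PySem.Int.band (st'.1 + (PySem.List.slice data (some ((j : Int) * 128)) (some ((j : Int) * 128 + 128))).sum) 0xFFFF, st'.2)) st
      = (match find_sector sectors trk side phys with
         | none => (st.1, st.2 + nrec)
         | some data =>
           ((PySem.List.pyRange 0 nrec 1).foldl
              (fun ck r => PySem.Int.band (ck + (PySem.List.slice data (some (r * 128)) (some (r * 128 + 128))).sum) 0xFFFF)
              st.1,
            st.2)) := by
  cases hfind : find_sector sectors trk side phys with
  | none =>
    simp only [hfind]
    rw [ctc_foldl_snd_add_one]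
    rw [List.length_range]
    rw [Int.toNat_of_nonneg hn]
  | some data =>
    simp only [hfind]
    rw [PySem.List.pyRange_one]
    rw [List.foldl_map]
    rw [ctc_foldl_fst (fun ck (j : Nat) =>
      PySem.Int.band (ck + (PySem.List.slice data (some ((j : Int) * 128)) (some ((j : Int) * 128 + 128))).sum) 0xFFFF)]
    simp only [zero_add, Int.sub_zero]

-- one host sector: A's fold over the block of records equals B's host-sector step
lemma ctc_block (sectors : List (Int × Int × Int × List Int)) (trk cpmspt secshf eotv : Int) (trantb : List Int)
    (hs : Int) (h0 : 0 ≤ hs) (hlt : hs * 2 ^ (secshf - 1).toNat < cpmspt) (st : Int × Int) :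
    (PySem.List.pyRange (hs * 2 ^ (secshf - 1).toNat) (min ((hs + 1) * 2 ^ (secshf - 1).toNat) cpmspt) 1).foldl
        (ctcA_body sectors trk secshf eotv trantb) st
      = ctcB_host (ctc_index sectors) trk cpmspt (2 ^ (secshf - 1).toNat) eotv trantb st hs := by
  set k := (secshf - 1).toNat with hk
  have hRpos : (0 : Int) < 2 ^ k := by positivity
  set nrec : Int := min (2 ^ k) (cpmspt - hs * 2 ^ k) with hnrec
  have hnrec_pos : 0 < nrec := by omega
  have hnrecR : nrec ≤ 2 ^ k := by omega
  have hmin : min ((hs + 1) * 2 ^ k) cpmspt = hs * 2 ^ k + nrec := by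
    rw [show (hs + 1) * 2 ^ k = hs * 2 ^ k + 2 ^ k by ring]
    omega
  rw [hmin, PySem.List.pyRange_one, add_sub_cancel_left, List.foldl_map]
  have hbody : ∀ (st' : Int × Int) (j : Nat), j ∈ List.range nrec.toNat →
      ctcA_body sectors trk secshf eotv trantb st' (hs * 2 ^ k + (j : Int))
        = (match find_sector sectors trk (if hs < eotv then ((0 : Int), hs) else (1, hs - eotv)).1
              ((PySem.List.pyGet? trantb (if hs < eotv then ((0 : Int), hs) else (1, hs - eotv)).2).getD 0) with
           | none => (st'.1, st'.2 + 1)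
           | some data =>
             (PySem.Int.band (st'.1 + (PySem.List.slice data (some ((j : Int) * 128)) (some ((j : Int) * 128 + 128))).sum) 0xFFFF, st'.2)) := by
    intro st' j hj
    simp only [List.mem_range] at hj
    have hj1 : (0 : Int) ≤ (j : Int) := by positivity
    have hj2 : (j : Int) < 2 ^ k := by omega
    unfold ctcA_body
    rw [ctc_shr_block hs (j : Int) k h0 hj1 hj2]
    rw [ctc_one_shl]
    dsimp only
    rw [ctc_band_block hs (j : Int) k h0 hj1 hj2]
    by_cases hse : hs < eotv <;> simp only [hse, if_true, if_false, ite_true, ite_false]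
  refine Eq.trans (PySem.List.foldl_congr_mem (List.range nrec.toNat) _ _ st hbody) ?_
  rw [ctc_block_aux sectors trk _ _ nrec (le_of_lt hnrec_pos) st]
  unfold ctcB_host
  dsimp only
  by_cases hse : hs < eotv <;> simp only [hse, if_true, if_false, ite_true, ite_false, ← hnrec, ctc_index_get?]

-- m host sectors: A's fold over the first min(m·R, cpmspt) records equals B's fold over hosts 0..m-1
lemma ctc_prefix (sectors : List (Int × Int × Int × List Int)) (trk cpmspt secshf eotv : Int) (trantb : List Int)
    (hc : 0 < cpmspt) (m : Nat) (st : Int × Int)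
    (hm : (m : Int) ≤ -(PySem.Int.floordiv (-cpmspt) (2 ^ (secshf - 1).toNat))) :
    (PySem.List.pyRange 0 (min ((m : Int) * 2 ^ (secshf - 1).toNat) cpmspt) 1).foldl
        (ctcA_body sectors trk secshf eotv trantb) st
      = (PySem.List.pyRange 0 (m : Int) 1).foldl
          (ctcB_host (ctc_index sectors) trk cpmspt (2 ^ (secshf - 1).toNat) eotv trantb) st := by
  set k := (secshf - 1).toNat with hk
  have hRpos : (0 : Int) < 2 ^ k := by positivity
  set n_host : Int := -(PySem.Int.floordiv (-cpmspt) (2 ^ k)) with hnh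
  have hceil : (n_host - 1) * 2 ^ k < cpmspt ∧ cpmspt ≤ n_host * 2 ^ k :=
    (PySem.Int.neg_floordiv_neg_eq_iff_of_pos hRpos).mp rfl
  induction m generalizing st with
  | zero =>
    simp only [Nat.cast_zero, zero_mul]
    rw [min_eq_left (le_of_lt hc)]
    rw [PySem.List.pyRange_one_eq_nil (le_refl 0)]
    rfl
  | succ m ih =>
    have hm' : (m : Int) ≤ n_host := by push_cast at hm; omega
    have hmlt : (m : Int) * 2 ^ k < cpmspt := by
      have h1 : (m : Int) ≤ n_host - 1 := by push_cast at hm; omega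
      have h2 : (m : Int) * 2 ^ k ≤ (n_host - 1) * 2 ^ k :=
        mul_le_mul_of_nonneg_right h1 (le_of_lt hRpos)
      exact lt_of_le_of_lt h2 hceil.1
    have hge0 : (0 : Int) ≤ (m : Int) * 2 ^ k := by positivity
    have hle : (m : Int) * 2 ^ k ≤ min (((m : Int) + 1) * 2 ^ k) cpmspt := by
      rw [show ((m : Int) + 1) * 2 ^ k = (m : Int) * 2 ^ k + 2 ^ k by ring]
      omega
    push_cast
    have ih' := ih st hm'
    rw [min_eq_left (le_of_lt hmlt)] at ih'
    rw [PySem.List.pyRange_one_append 0 ((m : Int) * 2 ^ k) (min (((m : Int) + 1) * 2 ^ k) cpmspt) hge0 hle]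
    rw [List.foldl_append]
    rw [ih']
    rw [ctc_block sectors trk cpmspt secshf eotv trantb (m : Int) (by positivity) hmlt]
    rw [PySem.List.pyRange_one_succ_right (a := 0) (b := (m : Int)) (by positivity)]
    rw [List.foldl_append]
    rfl

-- ===== VERDICT (by name: the statement is the Claim_ definition above) =====
theorem compute_track_cksum_spec : Claim_equal_compute_track_cksum := by
  intro sectors trk cpmspt secshf eotv trantb hdom hpre
  unfold Spec_compute_track_cksum
  unfold compute_track_cksum compute_track_cksum_alt
  by_cases hc : 0 < cpmspt
  · rw [if_pos hc]
    dsimp only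
    rw [ctc_one_shl]
    set k := (secshf - 1).toNat with hk
    have hRpos : (0 : Int) < 2 ^ k := by positivity
    set n_host : Int := -(PySem.Int.floordiv (-cpmspt) (2 ^ k)) with hnh
    have hceil : (n_host - 1) * 2 ^ k < cpmspt ∧ cpmspt ≤ n_host * 2 ^ k :=
      (PySem.Int.neg_floordiv_neg_eq_iff_of_pos hRpos).mp rfl
    have hn1 : 1 ≤ n_host := by nlinarith [hceil.2]
    have hnt : ((n_host.toNat : Int)) = n_host := Int.toNat_of_nonneg (by omega)
    rw [show PySem.List.pyRange 0 cpmspt 1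
          = PySem.List.pyRange 0 (min ((n_host.toNat : Int) * 2 ^ k) cpmspt) 1 by
        rw [hnt, min_eq_right hceil.2]]
    rw [ctc_prefix sectors trk cpmspt secshf eotv trantb hc n_host.toNat (0, 0) (by rw [hnt])]
    rw [hnt]
  · rw [if_neg hc]
    rw [PySem.List.pyRange_one_eq_nil (by omega)]
    rfl
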